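-- pv_equiv track=rewrite | github.com/hmn1990/rubiks-cube-robot | src_21_step/verify_on_pc/cube.py | decode_8P8
-- ===== SOURCE A (Python) =====
-- def decode_8P8(num, x):
--     tmp = [0]*8
--     for i in range(2,8+1):
--         tmp[8-i] = x % i
--         x //= i
--     # 选择需要的数字，填到返回结果
--     num_to_select = list(num)
--     num_to_select.sort()
--     ret = [0] * 8
--     for i in range(8):
--         ret[i] = num_to_select[tmp[i]]
--         num_to_select.pop(tmp[i])
--     return ret
-- ===== SOURCE B (Python) =====
-- def decode_8P8(num, x):
--     # factorial digits top-down + scan for the k-th unused entry of the fixed sorted list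
--     fact = [1, 1, 2, 6, 24, 120, 720, 5040]
--     pairs = [[v, False] for v in sorted(num)]
--     ret = []
--     for i in range(8):
--         k = (x // fact[7 - i]) % (8 - i)
--         cnt = -1
--         j = 0
--         while True:
--             p = pairs[j]
--             if not p[1]:
--                 cnt += 1
--                 if cnt == k:
--                     break
--             j += 1
--         p[1] = True
--         ret.append(p[0])
--     return ret
-- ===== Notes on version B (the rewrite author's own statement) =====
-- stated objective: alternative
-- what changed: B computes each factorial-base digit directly as (x // fact[7-i]) % (8-i) instead of A's successive modulo/divide loop, and selects each output element by scanning a fixed sorted list with a used-mark for the k-th unused entry instead of A's list.pop on a shrinking list.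
import Mathlib
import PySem

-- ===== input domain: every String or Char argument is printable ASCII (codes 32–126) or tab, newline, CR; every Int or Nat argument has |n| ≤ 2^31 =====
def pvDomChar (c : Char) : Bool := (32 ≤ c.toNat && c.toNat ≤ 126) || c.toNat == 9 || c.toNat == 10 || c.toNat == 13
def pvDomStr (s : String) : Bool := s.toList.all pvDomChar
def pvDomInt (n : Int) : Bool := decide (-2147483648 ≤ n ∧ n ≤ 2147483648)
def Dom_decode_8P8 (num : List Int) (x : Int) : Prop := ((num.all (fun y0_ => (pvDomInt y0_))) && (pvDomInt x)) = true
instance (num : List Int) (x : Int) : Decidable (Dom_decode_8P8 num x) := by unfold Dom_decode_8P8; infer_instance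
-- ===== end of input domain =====

-- B replaces A's successive-modulo digit loop by a direct factorial-base digit formula and
-- A's shrinking sort+pop selection by a scan for the k-th unused element of the fixed
-- sorted list under a used-mark (objective: alternative decomposition, same cost).

-- ===== PORT A =====
-- A's first loop: tmp = [0]*8; for i in range(2,9): tmp[8-i] = x % i; x //= i
def tmpOf (x : Int) : List Int × Int :=
  (PySem.List.pyRange 2 9 1).foldl
    (fun st i => (PySem.List.pySetD st.1 (8 - i) (PySem.Int.mod st.2 i), PySem.Int.floordiv st.2 i))
    ([0, 0, 0, 0, 0, 0, 0, 0], x)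

-- body of A's second loop: ret[i] = num_to_select[tmp[i]]; num_to_select.pop(tmp[i])
-- (the pyGetD default and the none branch are unreachable under Pre_, where every index is in range)
def stepA (x : Int) (st : List Int × List Int) (i : Int) : List Int × List Int :=
  let t := PySem.List.pyGetD (tmpOf x).1 i 0
  (PySem.List.pySetD st.1 i (PySem.List.pyGetD st.2 t 0),
   match PySem.List.pop? st.2 t with
   | some r => r.2
   | none => st.2)

def decode_8P8 (num : List Int) (x : Int) : List Int :=
  ((PySem.List.pyRange 0 8 1).foldl (stepA x)
    ([0, 0, 0, 0, 0, 0, 0, 0], PySem.List.sorted num (fun v => v) false)).1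

-- ===== PORT B =====
-- B's inner loop: scan pairs, count unused entries, mark and take the one where cnt == k
def selectOne : List (Int × Bool) → Int → Int → Option (Int × List (Int × Bool))
  | [], _, _ => none
  | p :: rest, cnt, k =>
    if p.2 then
      match selectOne rest cnt k with
      | some (v, rest') => some (v, p :: rest')
      | none => none
    else if cnt + 1 = k then some (p.1, (p.1, true) :: rest)
    else match selectOne rest (cnt + 1) k with
      | some (v, rest') => some (v, p :: rest')
      | none => none

-- body of B's outer loop: k = (x // fact[7-i]) % (8-i); scan-and-mark
def stepB (x : Int) (st : List (Int × Bool) × List Int) (i : Int) : List (Int × Bool) × List Int :=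
  let k := PySem.Int.mod
    (PySem.Int.floordiv x (PySem.List.pyGetD ([1, 1, 2, 6, 24, 120, 720, 5040] : List Int) (7 - i) 1))
    (8 - i)
  match selectOne st.1 (-1) k with
  | some (v, ps') => (ps', st.2 ++ [v])
  | none => (st.1, st.2)

def decode_8P8_alt (num : List Int) (x : Int) : List Int :=
  ((PySem.List.pyRange 0 8 1).foldl (stepB x)
    ((PySem.List.sorted num (fun v => v) false).map (fun v => (v, false)), [])).2

-- ===== PRECONDITION & SPEC =====
-- A raises IndexError whenever num has fewer than 8 elements; it returns on every list of
-- length ≥ 8 (the permutation-decoding domain), so Pre_ is exactly A's returning inputs.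
def Pre_decode_8P8 (num : List Int) (x : Int) : Prop := 8 ≤ num.length
instance (num : List Int) (x : Int) : Decidable (Pre_decode_8P8 num x) := by unfold Pre_decode_8P8; infer_instance
def pvWitness_decode_8P8 : List Int × Int := ([0, 1, 2, 3, 4, 5, 6, 7], 12345)

def Spec_decode_8P8 (num : List Int) (x : Int) (out : List Int) : Prop := out = decode_8P8_alt num x
instance (num : List Int) (x : Int) (out : List Int) : Decidable (Spec_decode_8P8 num x out) := by unfold Spec_decode_8P8; infer_instance

-- ===== CLAIM (what is proved, stated in full; the proofs are below) =====
def Claim_equal_decode_8P8 : Prop := ∀ (num : List Int) (x : Int), Dom_decode_8P8 num x → Pre_decode_8P8 num x → Spec_decode_8P8 num x (decode_8P8 num x)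

-- ===== LEMMAS AND PROOFS =====

-- A's digit list written out
theorem tmpOf_eq (x : Int) : (tmpOf x).1 =
    [PySem.Int.mod (PySem.Int.floordiv x 5040) 8,
     PySem.Int.mod (PySem.Int.floordiv x 720) 7,
     PySem.Int.mod (PySem.Int.floordiv x 120) 6,
     PySem.Int.mod (PySem.Int.floordiv x 24) 5,
     PySem.Int.mod (PySem.Int.floordiv x 6) 4,
     PySem.Int.mod (PySem.Int.floordiv x 2) 3,
     PySem.Int.mod x 2, 0] := by
  have hr : PySem.List.pyRange 2 9 1 = [2, 3, 4, 5, 6, 7, 8] := by decide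
  unfold tmpOf
  rw [hr]
  simp [List.foldl, PySem.List.pySetD_of_nonneg]
  norm_num [Int.ediv_ediv_of_nonneg]

-- A's tmp[i] equals B's top-down factorial digit (x // fact[7-i]) % (8-i)
theorem digits_eq (x i : Int) (h0 : 0 ≤ i) (h8 : i < 8) :
    PySem.List.pyGetD (tmpOf x).1 i 0 =
    PySem.Int.mod
      (PySem.Int.floordiv x (PySem.List.pyGetD ([1, 1, 2, 6, 24, 120, 720, 5040] : List Int) (7 - i) 1))
      (8 - i) := by
  rw [tmpOf_eq]
  interval_cases i <;>
    norm_num [PySem.List.pyGetD_eq_getElem, PySem.Int.floordiv_eq_ediv_of_pos,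
      (by decide : Int.toNat 0 = 0), (by decide : Int.toNat 1 = 1), (by decide : Int.toNat 2 = 2),
      (by decide : Int.toNat 3 = 3), (by decide : Int.toNat 4 = 4), (by decide : Int.toNat 5 = 5),
      (by decide : Int.toNat 6 = 6), (by decide : Int.toNat 7 = 7)]

-- the unused elements of a mask list, in order
def F (ps : List (Int × Bool)) : List Int := (ps.filter (fun p => !p.2)).map Prod.fst

theorem F_map (l : List Int) : F (l.map (fun v => (v, false))) = l := by
  induction l with
  | nil => rfl
  | cons a t ih => simp [F] at ih ⊢; exact ih

-- B's scan takes the (k-cnt-1)-th unused element and marking it erases it from the unused list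
theorem sel_spec (ps : List (Int × Bool)) : ∀ (cnt k : Int),
    0 ≤ k - cnt - 1 → (k - cnt - 1).toNat < (F ps).length →
    ∃ v ps', selectOne ps cnt k = some (v, ps') ∧
      (F ps)[(k - cnt - 1).toNat]? = some v ∧
      F ps' = (F ps).eraseIdx (k - cnt - 1).toNat := by
  induction ps with
  | nil => intro cnt k h0 hlt; simp [F] at hlt
  | cons p rest ih =>
    intro cnt k h0 hlt
    rcases p with ⟨a, b⟩
    cases b with
    | true =>
      have hF : F ((a, true) :: rest) = F rest := by simp [F]
      rw [hF] at hlt ⊢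
      obtain ⟨v, ps', hsel, hget, herase⟩ := ih cnt k h0 hlt
      refine ⟨v, (a, true) :: ps', ?_, hget, ?_⟩
      · simp [selectOne, hsel]
      · simpa [F] using herase
    | false =>
      have hF : F ((a, false) :: rest) = a :: F rest := by simp [F]
      rw [hF] at hlt ⊢
      by_cases hk : cnt + 1 = k
      · have hz : (k - cnt - 1).toNat = 0 := by omega
        refine ⟨a, (a, true) :: rest, ?_, ?_, ?_⟩
        · simp [selectOne, hk]
        · simp [hz]
        · simp [F, hz]
      · have h1 : 0 ≤ k - (cnt + 1) - 1 := by omega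
        have hsn : (k - cnt - 1).toNat = (k - (cnt + 1) - 1).toNat + 1 := by omega
        rw [hsn] at hlt ⊢
        have hlt' : (k - (cnt + 1) - 1).toNat < (F rest).length := by
          simpa using Nat.lt_of_succ_lt_succ hlt
        obtain ⟨v, ps', hsel, hget, herase⟩ := ih (cnt + 1) k h1 hlt'
        refine ⟨v, (a, false) :: ps', ?_, ?_, ?_⟩
        · simp [selectOne, hk, hsel]
        · simpa using hget
        · simpa [F] using herase

theorem set_append_len {α : Type} (pre post : List α) (v : α) :
    (pre ++ post).set pre.length v = pre ++ post.set 0 v := by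
  induction pre with
  | nil => rfl
  | cons a t ih => simp [ih]

-- invariant of the two selection loops: A's shrinking list is the unused part of B's mask
-- list, and A's written prefix is B's accumulated output
theorem loop_eq (x : Int) : ∀ (n : Nat), n ≤ 8 →
    ∀ (nts : List Int) (ps : List (Int × Bool)) (retB : List Int),
    F ps = nts → n ≤ nts.length → retB.length = 8 - n →
    ((PySem.List.pyRange (8 - (n : Int)) 8 1).foldl (stepA x) (retB ++ List.replicate n 0, nts)).1
    = ((PySem.List.pyRange (8 - (n : Int)) 8 1).foldl (stepB x) (ps, retB)).2 := by
  intro n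
  induction n with
  | zero =>
    intro _ nts ps retB _ _ _
    rw [PySem.List.pyRange_one_eq_nil (by norm_num)]
    simp
  | succ n ih =>
    intro hn8 nts ps retB hF hlen hretB
    have hi0 : (0 : Int) ≤ 8 - ((n + 1 : Nat) : Int) := by push_cast; omega
    have hi8 : (8 : Int) - ((n + 1 : Nat) : Int) < 8 := by push_cast; omega
    rw [PySem.List.pyRange_one_cons (by omega : (8 : Int) - ((n + 1 : Nat) : Int) < 8)]
    simp only [List.foldl]
    set i : Int := 8 - ((n + 1 : Nat) : Int) with hidef
    set k : Int := PySem.Int.mod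
      (PySem.Int.floordiv x (PySem.List.pyGetD ([1, 1, 2, 6, 24, 120, 720, 5040] : List Int) (7 - i) 1))
      (8 - i) with hkdef
    have h8i : (8 : Int) - i = ((n + 1 : Nat) : Int) := by omega
    have hk0 : 0 ≤ k := PySem.Int.mod_nonneg _ (by omega)
    have hklt : k < ((n + 1 : Nat) : Int) := h8i ▸ PySem.Int.mod_lt _ (by omega)
    have hkn : k.toNat < nts.length := by omega
    have hkA : PySem.List.pyGetD (tmpOf x).1 i 0 = k := digits_eq x i hi0 hi8
    have hcast : ((k.toNat : Nat) : Int) = k := Int.toNat_of_nonneg hk0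
    have hpop : PySem.List.pop? nts k = some (nts[k.toNat], nts.eraseIdx k.toNat) := by
      have h := PySem.List.pop?_natCast (xs := nts) (n := k.toNat) hkn
      rwa [hcast] at h
    have hget : PySem.List.pyGetD nts k 0 = nts[k.toNat] := by
      have h := PySem.List.pyGetD_eq_getElem (xs := nts) (i := k) (d := 0) hk0 (by omega)
      exact h
    have hretlen : i.toNat = retB.length := by omega
    have hsetA : PySem.List.pySetD (retB ++ List.replicate (n + 1) 0) i nts[k.toNat]
        = (retB ++ [nts[k.toNat]]) ++ List.replicate n 0 := by
      rw [PySem.List.pySetD_of_nonneg (xs := retB ++ List.replicate (n + 1) 0)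
            (v := nts[k.toNat]) hi0, hretlen, set_append_len]
      simp [List.replicate_succ]
    have hA : stepA x (retB ++ List.replicate (n + 1) 0, nts) i
        = ((retB ++ [nts[k.toNat]]) ++ List.replicate n 0, nts.eraseIdx k.toNat) := by
      unfold stepA
      rw [hkA]
      simp only [hpop, hget, hsetA]
    have hkk : k - (-1) - 1 = k := by ring
    obtain ⟨v, ps', hsel, hgetB, herase⟩ :=
      sel_spec ps (-1) k (by omega) (by rw [hkk, hF]; exact hkn)
    rw [hkk] at hgetB herase
    rw [hF] at hgetB herase
    have hv : v = nts[k.toNat] := by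
      rw [List.getElem?_eq_getElem hkn] at hgetB
      exact (Option.some_injective _ hgetB).symm
    have hB : stepB x (ps, retB) i = (ps', retB ++ [v]) := by
      unfold stepB
      simp only [← hkdef, hsel]
    rw [hA, hB]
    have hstart : i + 1 = 8 - (n : Int) := by omega
    rw [hstart, hv]
    exact ih (by omega) (nts.eraseIdx k.toNat) ps' (retB ++ [nts[k.toNat]])
      herase (by simp [List.length_eraseIdx, hkn]; omega) (by simp; omega)

-- ===== VERDICT (by name: the statement is the Claim_ definition above) =====
theorem decode_8P8_spec : Claim_equal_decode_8P8 := by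
  intro num x _hdom hpre
  unfold Spec_decode_8P8 decode_8P8 decode_8P8_alt
  have hs : (PySem.List.sorted num (fun v => v) false).length = num.length :=
    PySem.List.length_sorted ..
  have h := loop_eq x 8 (by norm_num)
    (PySem.List.sorted num (fun v => v) false)
    ((PySem.List.sorted num (fun v => v) false).map (fun v => (v, false)))
    [] (F_map _) (by rw [hs]; exact hpre) rfl
  simpa using h
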